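-- pv_equiv track=rewrite | github.com/MrBrantCode/unitest_baseline | mut_generate/mist_train_cf/cf_42830/solution.py | is_valid_git_branch
-- ===== SOURCE A (Python) =====
-- def is_valid_git_branch(branch_name: str) -> bool:
--     if any(char in branch_name for char in ['~', '^', ':', '?', '*', '[', '\\']) or \
--        ' ' in branch_name or \
--        branch_name.startswith('-') or \
--        branch_name.endswith('/') or \
--        '..' in branch_name or \
--        './' in branch_name:
--         return False
--     return True
-- ===== SOURCE B (Python) =====
-- def is_valid_git_branch(branch_name: str) -> bool:
--     if branch_name.startswith('-') or branch_name.endswith('/'):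
--         return False
--     prev = None
--     for ch in branch_name:
--         if ch in '~^:?*[\\ ':
--             return False
--         if prev == '.' and (ch == '.' or ch == '/'):
--             return False
--         prev = ch
--     return True
-- ===== Notes on version B (the rewrite author's own statement) =====
-- stated objective: alternative
-- what changed: Replaced A's ~10 separate substring scans (one per forbidden character plus '..' and './') by a single left-to-right character pass that tracks the previous character, with the first/last-character checks done once up front.
import Mathlib
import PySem

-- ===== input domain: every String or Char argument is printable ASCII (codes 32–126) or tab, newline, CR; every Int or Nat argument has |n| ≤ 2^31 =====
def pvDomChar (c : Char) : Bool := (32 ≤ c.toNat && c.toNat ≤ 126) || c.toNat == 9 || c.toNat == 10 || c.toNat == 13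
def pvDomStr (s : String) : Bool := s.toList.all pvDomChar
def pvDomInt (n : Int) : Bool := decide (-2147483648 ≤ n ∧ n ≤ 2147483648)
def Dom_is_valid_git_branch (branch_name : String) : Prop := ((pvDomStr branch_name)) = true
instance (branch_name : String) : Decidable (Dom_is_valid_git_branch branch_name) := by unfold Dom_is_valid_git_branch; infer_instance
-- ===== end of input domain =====

-- B replaces A's many per-pattern substring scans by one character pass tracking the previous character (objective: alternative single-pass algorithm; not measured faster).

-- ===== PORT A =====
def is_valid_git_branch (branch_name : String) : Bool :=
  if (["~", "^", ":", "?", "*", "[", "\\"].any (fun char => PySem.Str.isIn char branch_name))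
     || PySem.Str.isIn " " branch_name
     || PySem.Str.startswith branch_name "-"
     || PySem.Str.endswith branch_name "/"
     || PySem.Str.isIn ".." branch_name
     || PySem.Str.isIn "./" branch_name
  then false else true

-- ===== PORT B =====
-- the single pass of Source B: prev is None initially, then the previous character
def altLoop : Option Char → List Char → Bool
  | _, [] => true
  | prev, c :: rest =>
    if ['~', '^', ':', '?', '*', '[', '\\', ' '].contains c then false
    else if prev == some '.' && (c == '.' || c == '/') then false
    else altLoop (some c) rest

def is_valid_git_branch_alt (branch_name : String) : Bool :=
  if PySem.Str.startswith branch_name "-" || PySem.Str.endswith branch_name "/" then false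
  else altLoop none branch_name.toList

-- ===== PRECONDITION & SPEC =====
def Spec_is_valid_git_branch (branch_name : String) (out : Bool) : Prop := out = is_valid_git_branch_alt branch_name
instance (branch_name : String) (out : Bool) : Decidable (Spec_is_valid_git_branch branch_name out) := by unfold Spec_is_valid_git_branch; infer_instance

-- ===== CLAIM (what is proved, stated in full; the proofs are below) =====
def Claim_equal_is_valid_git_branch : Prop := ∀ (branch_name : String), Dom_is_valid_git_branch branch_name → Spec_is_valid_git_branch branch_name (is_valid_git_branch branch_name)

-- ===== LEMMAS AND PROOFS =====

theorem singleton_infix_iff {a : Char} {l : List Char} : [a] <:+: l ↔ a ∈ l := by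
  constructor
  · intro h; exact List.singleton_sublist.mp h.sublist
  · intro h
    obtain ⟨s, t, rfl⟩ := List.append_of_mem h
    exact ⟨s, t, by simp⟩

theorem prefix_singleton_iff {a : Char} {l : List Char} : [a] <+: l ↔ l.head? = some a := by
  cases l <;> simp [List.cons_prefix_cons, eq_comm]

theorem infix_dot_cons_iff (b c : Char) (rest : List Char) :
    ([('.' : Char), b] <:+: c :: rest) ↔
      (c = '.' ∧ rest.head? = some b) ∨ [('.' : Char), b] <:+: rest := by
  rw [List.infix_cons_iff, List.cons_prefix_cons]
  constructor
  · rintro (⟨h, hpre⟩ | h)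
    · exact Or.inl ⟨h.symm, prefix_singleton_iff.mp hpre⟩
    · exact Or.inr h
  · rintro (⟨h, hh⟩ | h)
    · exact Or.inl ⟨h.symm, prefix_singleton_iff.mpr hh⟩
    · exact Or.inr h

theorem altLoop_eq_true_iff (l : List Char) (prev : Option Char) :
    altLoop prev l = true ↔
      ((∀ c ∈ l, (['~', '^', ':', '?', '*', '[', '\\', ' '].contains c) = false) ∧
       ¬ (['.', '.'] <:+: l) ∧ ¬ (['.', '/'] <:+: l) ∧
       ¬ (prev = some '.' ∧ (l.head? = some '.' ∨ l.head? = some '/'))) := by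
  induction l generalizing prev with
  | nil => simp [altLoop]
  | cons c rest ih =>
    by_cases hc : (['~', '^', ':', '?', '*', '[', '\\', ' '].contains c) = true
    · simp only [altLoop, hc, if_pos]
      constructor
      · intro h; exact absurd h (by simp)
      · rintro ⟨hall, -⟩
        rw [hall c (List.mem_cons_self)] at hc
        cases hc
    · by_cases hp : (prev == some '.' && (c == '.' || c == '/')) = true
      · simp only [altLoop, hc, hp, if_pos]
        simp only [Bool.and_eq_true, beq_iff_eq, Bool.or_eq_true] at hp
        constructor
        · intro h; exact absurd h (by simp)
        · rintro ⟨-, -, -, hh⟩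
          exact absurd ⟨hp.1, by rcases hp.2 with h | h <;> simp [h]⟩ hh
      · have hloop : altLoop prev (c :: rest) = altLoop (some c) rest := by
          simp only [altLoop]
          rw [if_neg hc, if_neg hp]
        rw [hloop, ih]
        simp only [Bool.and_eq_true, beq_iff_eq, Bool.or_eq_true, not_and, not_or] at hp
        constructor
        · rintro ⟨hall, h1, h2, hh⟩
          refine ⟨?_, ?_, ?_, ?_⟩
          · intro x hx
            rcases List.mem_cons.mp hx with rfl | hx
            · exact Bool.eq_false_iff.mpr hc
            · exact hall x hx
          · rw [infix_dot_cons_iff]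
            rintro (⟨rfl, hhd⟩ | hr)
            · exact hh ⟨rfl, Or.inl hhd⟩
            · exact h1 hr
          · rw [infix_dot_cons_iff]
            rintro (⟨rfl, hhd⟩ | hr)
            · exact hh ⟨rfl, Or.inr hhd⟩
            · exact h2 hr
          · rintro ⟨hpv, hhd⟩
            rcases hhd with h | h <;> rw [List.head?_cons, Option.some_inj] at h
            · exact (hp hpv).1 h
            · exact (hp hpv).2 h
        · rintro ⟨hall, h1, h2, hh⟩
          refine ⟨fun x hx => hall x (List.mem_cons_of_mem c hx), ?_, ?_, ?_⟩
          · intro hr; exact h1 ((infix_dot_cons_iff _ _ _).mpr (Or.inr hr))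
          · intro hr; exact h2 ((infix_dot_cons_iff _ _ _).mpr (Or.inr hr))
          · rintro ⟨hcd, hhd⟩
            rw [Option.some_inj] at hcd
            rcases hhd with h | h
            · exact h1 ((infix_dot_cons_iff _ _ _).mpr (Or.inl ⟨hcd, h⟩))
            · exact h2 ((infix_dot_cons_iff _ _ _).mpr (Or.inl ⟨hcd, h⟩))

-- A is true iff none of the forbidden patterns occurs
theorem portA_eq_true_iff (s : String) :
    is_valid_git_branch s = true ↔
      ((∀ c ∈ s.toList, (['~', '^', ':', '?', '*', '[', '\\', ' '].contains c) = false) ∧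
       ¬ (['.', '.'] <:+: s.toList) ∧ ¬ (['.', '/'] <:+: s.toList) ∧
       ¬ (['-'] <+: s.toList) ∧ ¬ (['/'] <:+ s.toList)) := by
  unfold is_valid_git_branch
  split
  · rename_i h
    simp only [Bool.or_eq_true, List.any_eq_true] at h
    constructor
    · intro hf; exact absurd hf (by simp)
    · rintro ⟨hall, hdd, hds, hpre, hsuf⟩
      exfalso
      rcases h with ((((⟨p, hp, hin⟩ | hsp) | hst) | hen) | hdd') | hds'
      · rw [PySem.Str.isIn_iff_infix] at hin
        simp only [List.mem_cons, List.not_mem_nil, or_false] at hp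
        rcases hp with rfl | rfl | rfl | rfl | rfl | rfl | rfl <;>
          [ (have hin' : [('~' : Char)] <:+: s.toList := by
               rw [show [('~' : Char)] = "~".toList from by decide]; exact hin);
            (have hin' : [('^' : Char)] <:+: s.toList := by
               rw [show [('^' : Char)] = "^".toList from by decide]; exact hin);
            (have hin' : [(':' : Char)] <:+: s.toList := by
               rw [show [(':' : Char)] = ":".toList from by decide]; exact hin);
            (have hin' : [('?' : Char)] <:+: s.toList := by
               rw [show [('?' : Char)] = "?".toList from by decide]; exact hin);
            (have hin' : [('*' : Char)] <:+: s.toList := by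
               rw [show [('*' : Char)] = "*".toList from by decide]; exact hin);
            (have hin' : [('[' : Char)] <:+: s.toList := by
               rw [show [('[' : Char)] = "[".toList from by decide]; exact hin);
            (have hin' : [('\\' : Char)] <:+: s.toList := by
               rw [show [('\\' : Char)] = "\\".toList from by decide]; exact hin)] <;>
          exact absurd (hall _ (singleton_infix_iff.mp hin')) (by decide)
      · rw [PySem.Str.isIn_iff_infix] at hsp
        have hin' : [(' ' : Char)] <:+: s.toList := by
          rw [show [(' ' : Char)] = " ".toList from by decide]; exact hsp
        exact absurd (hall _ (singleton_infix_iff.mp hin')) (by decide)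
      · rw [PySem.Str.startswith_eq, PySem.Chars.startswith_iff] at hst
        exact hpre (by rw [show [('-' : Char)] = "-".toList from by decide]; exact hst)
      · rw [PySem.Str.endswith_eq, PySem.Chars.endswith_iff] at hen
        exact hsuf (by rw [show [('/' : Char)] = "/".toList from by decide]; exact hen)
      · rw [PySem.Str.isIn_iff_infix] at hdd'
        exact hdd (by rw [show [('.' : Char), '.'] = "..".toList from by decide]; exact hdd')
      · rw [PySem.Str.isIn_iff_infix] at hds'
        exact hds (by rw [show [('.' : Char), '/'] = "./".toList from by decide]; exact hds')
  · rename_i h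
    simp only [Bool.or_eq_true, List.any_eq_true, not_or] at h
    obtain ⟨⟨⟨⟨⟨hchars, hsp⟩, hst⟩, hen⟩, hdd⟩, hds⟩ := h
    constructor
    · intro _
      refine ⟨?_, ?_, ?_, ?_, ?_⟩
      · intro c hc
        by_contra hbad
        rw [Bool.not_eq_false, List.contains_eq_mem, decide_eq_true_iff] at hbad
        have hinf : [c] <:+: s.toList := singleton_infix_iff.mpr hc
        fin_cases hbad
        · exact hchars ⟨"~", by simp, (PySem.Str.isIn_iff_infix _ _).mpr
            (by rw [show "~".toList = [('~' : Char)] from by decide]; exact hinf)⟩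
        · exact hchars ⟨"^", by simp, (PySem.Str.isIn_iff_infix _ _).mpr
            (by rw [show "^".toList = [('^' : Char)] from by decide]; exact hinf)⟩
        · exact hchars ⟨":", by simp, (PySem.Str.isIn_iff_infix _ _).mpr
            (by rw [show ":".toList = [(':' : Char)] from by decide]; exact hinf)⟩
        · exact hchars ⟨"?", by simp, (PySem.Str.isIn_iff_infix _ _).mpr
            (by rw [show "?".toList = [('?' : Char)] from by decide]; exact hinf)⟩
        · exact hchars ⟨"*", by simp, (PySem.Str.isIn_iff_infix _ _).mpr
            (by rw [show "*".toList = [('*' : Char)] from by decide]; exact hinf)⟩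
        · exact hchars ⟨"[", by simp, (PySem.Str.isIn_iff_infix _ _).mpr
            (by rw [show "[".toList = [('[' : Char)] from by decide]; exact hinf)⟩
        · exact hchars ⟨"\\", by simp, (PySem.Str.isIn_iff_infix _ _).mpr
            (by rw [show "\\".toList = [('\\' : Char)] from by decide]; exact hinf)⟩
        · exact hsp ((PySem.Str.isIn_iff_infix _ _).mpr
            (by rw [show " ".toList = [(' ' : Char)] from by decide]; exact hinf))
      · intro hx
        exact hdd ((PySem.Str.isIn_iff_infix _ _).mpr
          (by rw [show "..".toList = [('.' : Char), '.'] from by decide]; exact hx))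
      · intro hx
        exact hds ((PySem.Str.isIn_iff_infix _ _).mpr
          (by rw [show "./".toList = [('.' : Char), '/'] from by decide]; exact hx))
      · intro hx
        refine hst ?_
        rw [PySem.Str.startswith_eq]
        exact (PySem.Chars.startswith_iff _ _).mpr
          (by rw [show "-".toList = [('-' : Char)] from by decide]; exact hx)
      · intro hx
        refine hen ?_
        rw [PySem.Str.endswith_eq]
        exact (PySem.Chars.endswith_iff _ _).mpr
          (by rw [show "/".toList = [('/' : Char)] from by decide]; exact hx)
    · intro _; rfl

theorem portB_eq_true_iff (s : String) :
    is_valid_git_branch_alt s = true ↔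
      ((∀ c ∈ s.toList, (['~', '^', ':', '?', '*', '[', '\\', ' '].contains c) = false) ∧
       ¬ (['.', '.'] <:+: s.toList) ∧ ¬ (['.', '/'] <:+: s.toList) ∧
       ¬ (['-'] <+: s.toList) ∧ ¬ (['/'] <:+ s.toList)) := by
  unfold is_valid_git_branch_alt
  split
  · rename_i h
    simp only [Bool.or_eq_true] at h
    constructor
    · intro hf; exact absurd hf (by simp)
    · rintro ⟨-, -, -, hpre, hsuf⟩
      exfalso
      rcases h with hst | hen
      · rw [PySem.Str.startswith_eq, PySem.Chars.startswith_iff] at hst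
        exact hpre (by rw [show [('-' : Char)] = "-".toList from by decide]; exact hst)
      · rw [PySem.Str.endswith_eq, PySem.Chars.endswith_iff] at hen
        exact hsuf (by rw [show [('/' : Char)] = "/".toList from by decide]; exact hen)
  · rename_i h
    simp only [Bool.or_eq_true, not_or] at h
    obtain ⟨hst, hen⟩ := h
    rw [altLoop_eq_true_iff]
    constructor
    · rintro ⟨hall, hdd, hds, -⟩
      refine ⟨hall, hdd, hds, ?_, ?_⟩
      · intro hx
        refine hst ?_
        rw [PySem.Str.startswith_eq]
        exact (PySem.Chars.startswith_iff _ _).mpr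
          (by rw [show "-".toList = [('-' : Char)] from by decide]; exact hx)
      · intro hx
        refine hen ?_
        rw [PySem.Str.endswith_eq]
        exact (PySem.Chars.endswith_iff _ _).mpr
          (by rw [show "/".toList = [('/' : Char)] from by decide]; exact hx)
    · rintro ⟨hall, hdd, hds, -, -⟩
      exact ⟨hall, hdd, hds, by rintro ⟨h, -⟩; cases h⟩

-- ===== VERDICT (by name: the statement is the Claim_ definition above) =====
theorem is_valid_git_branch_spec : Claim_equal_is_valid_git_branch := by
  intro s _
  unfold Spec_is_valid_git_branch
  have h := (portA_eq_true_iff s).trans (portB_eq_true_iff s).symm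
  cases hA : is_valid_git_branch s
  · cases hB : is_valid_git_branch_alt s
    · rfl
    · exact absurd (h.mpr hB) (by simp [hA])
  · exact (h.mp hA).symm
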